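-- pv_equiv track=rewrite | github.com/quantumudit/ExcelBI-Challenges | 2024/Q1/2024_01_04_solution.py | text_transform
-- ===== SOURCE A (Python) =====
-- import string
--
-- def char_type(char: str) -> str:
--     """
--     This function takes a single character as input and returns
--     the type of the character.
--
--     Args:
--         char (str): A single character string.
--
--     Returns:
--         str: The type of the character. It returns "lower" if the character is a
--         lowercase letter, "upper" if the character is an uppercase letter, "digit"
--         if the character is a digit, and "special" for any other characters.
--     """
--     if char in string.ascii_lowercase:
--         group = "lower"
--     elif char in string.ascii_uppercase:
--         group = "upper"
--     elif char in string.digits: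
--         group = "digit"
--     else:
--         group = "special"
--     return group
--
-- def text_transform(text: str) -> str:
--     """
--     This function transforms a given text by inserting a comma between characters
--     of different types.
--
--     Args:
--         text (str): The input string that needs to be transformed.
--
--     Returns:
--         str: The transformed string with commas inserted between characters
--         of different types.
--     """
--     text_len = len(text)
--     letters = ""
--     for idx in range(text_len):
--         current_char_type = char_type(text[idx])
--         prev_char_type = char_type(text[idx - 1])
--         if idx > 0:
--             if current_char_type != prev_char_type:
--                 letters += f", {text[idx]}"
--             else:
--                 letters += text[idx]
--         else:
--             letters += text[idx]
--     return letters
-- ===== SOURCE B (Python) =====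
-- import string
--
-- def char_type(char: str) -> str:
--     if char in string.ascii_lowercase:
--         group = "lower"
--     elif char in string.ascii_uppercase:
--         group = "upper"
--     elif char in string.digits:
--         group = "digit"
--     else:
--         group = "special"
--     return group
--
-- def text_transform(text: str) -> str:
--     # Split the text into maximal runs of same-type characters, then join the
--     # runs with ", ".
--     runs = []
--     i = 0
--     n = len(text)
--     while i < n:
--         t = char_type(text[i])
--         j = i + 1
--         while j < n and char_type(text[j]) == t:
--             j += 1
--         runs.append(text[i:j])
--         i = j
--     return ", ".join(runs)
-- ===== Notes on version B (the rewrite author's own statement) =====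
-- stated objective: idiomatic
-- what changed: B partitions the string into maximal runs of same-type characters (two-pointer run extraction with slices) and joins the run substrings with a comma-space separator, instead of A's per-index loop that calls char_type on each character and its predecessor and appends piecewise.
import Mathlib
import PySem

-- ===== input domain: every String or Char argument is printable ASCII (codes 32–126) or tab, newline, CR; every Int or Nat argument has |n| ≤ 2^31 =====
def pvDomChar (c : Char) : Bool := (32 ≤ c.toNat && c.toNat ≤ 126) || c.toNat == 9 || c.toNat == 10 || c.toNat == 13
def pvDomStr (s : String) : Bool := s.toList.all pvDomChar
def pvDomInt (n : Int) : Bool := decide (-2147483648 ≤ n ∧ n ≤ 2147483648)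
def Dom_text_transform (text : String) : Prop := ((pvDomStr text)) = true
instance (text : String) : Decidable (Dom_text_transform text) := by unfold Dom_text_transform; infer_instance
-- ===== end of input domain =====

-- B splits the text into maximal runs of same-type characters and joins them with ", ";
-- A compares each character's type with its predecessor's in an index loop (same O(n) cost).

-- ===== PORT A =====
-- char_type: membership tests against the string constants, branch order as in Python
def charType (c : Char) : String :=
  if "abcdefghijklmnopqrstuvwxyz".toList.contains c then "lower"
  else if "ABCDEFGHIJKLMNOPQRSTUVWXYZ".toList.contains c then "upper"
  else if "0123456789".toList.contains c then "digit"
  else "special"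

def text_transform (text : String) : String :=
  let cs := text.toList
  let n : Int := cs.length
  -- letters accumulated as List Char; text[idx] / text[idx-1] are always in range
  -- when the loop runs (idx-1 = -1 at idx 0 is Python's last element), so pyGetD is exact
  let letters := (PySem.List.pyRange 0 n 1).foldl
    (fun (letters : List Char) idx =>
      if idx > 0 then
        if charType (PySem.List.pyGetD cs idx ' ') ≠ charType (PySem.List.pyGetD cs (idx - 1) ' ') then
          letters ++ [',', ' ', PySem.List.pyGetD cs idx ' ']
        else
          letters ++ [PySem.List.pyGetD cs idx ' ']
      else
        letters ++ [PySem.List.pyGetD cs idx ' ']) []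
  String.ofList letters

-- ===== PORT B =====
-- the outer while of Source B: extract the maximal run starting at the current position
-- (inner while = takeWhile / dropWhile over the remainder), recurse on what is left
def collectRuns (cs : List Char) : List (List Char) :=
  match cs with
  | [] => []
  | c :: rest =>
    (c :: rest.takeWhile (fun d => charType d == charType c)) ::
      collectRuns (rest.dropWhile (fun d => charType d == charType c))
termination_by cs.length
decreasing_by
  have := List.length_dropWhile_le (p := fun d => charType d == charType c) (l := rest)
  simp only [List.length_cons]
  omega

def text_transform_alt (text : String) : String :=
  -- ", ".join(runs)
  String.ofList (List.intercalate [',', ' '] (collectRuns text.toList))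

-- ===== PRECONDITION & SPEC =====
def Spec_text_transform (text : String) (out : String) : Prop := out = text_transform_alt text
instance (text : String) (out : String) : Decidable (Spec_text_transform text out) := by unfold Spec_text_transform; infer_instance

-- ===== CLAIM (what is proved, stated in full; the proofs are below) =====
def Claim_equal_text_transform : Prop := ∀ (text : String), Dom_text_transform text → Spec_text_transform text (text_transform text)

-- ===== LEMMAS AND PROOFS =====

theorem collectRuns_nil : collectRuns [] = [] := by rw [collectRuns]

theorem collectRuns_cons (c : Char) (rest : List Char) :
    collectRuns (c :: rest) =
      (c :: rest.takeWhile (fun d => charType d == charType c)) ::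
        collectRuns (rest.dropWhile (fun d => charType d == charType c)) := by
  rw [collectRuns]

-- common spec: the suffix both programs produce after the first character,
-- given the previous character p
def tailA (p : Char) : List Char → List Char
  | [] => []
  | c :: t => (if charType c ≠ charType p then [',', ' ', c] else [c]) ++ tailA c t

theorem tailA_congr (p q : Char) (l : List Char) (h : charType p = charType q) :
    tailA p l = tailA q l := by
  cases l with
  | nil => rfl
  | cons c t => simp [tailA, h]

theorem tailA_append_same (run : List Char) :
    ∀ (p : Char) (rest : List Char), (∀ d ∈ run, charType d = charType p) →
    tailA p (run ++ rest) = run ++ tailA p rest := by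
  induction run with
  | nil => intro p rest _; rfl
  | cons d run' ih =>
    intro p rest h
    have hd : charType d = charType p := h d (by simp)
    have hrun' : ∀ e ∈ run', charType e = charType d := by
      intro e he; rw [hd]; exact h e (by simp [he])
    simp only [List.cons_append, tailA, hd]
    rw [ih d rest hrun', tailA_congr d p rest hd]
    simp

-- B-side characterization
theorem intercalate_cons_cons (sep x y : List Char) (L : List (List Char)) :
    List.intercalate sep (x :: y :: L) = x ++ sep ++ List.intercalate sep (y :: L) := by
  simp [List.intercalate, List.intersperse]

theorem dropWhile_head_false (p : Char → Bool) :
    ∀ (l : List Char) (x : Char) (xs : List Char), l.dropWhile p = x :: xs → p x = false := by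
  intro l
  induction l with
  | nil => intro x xs h; simp [List.dropWhile] at h
  | cons a l ih =>
    intro x xs h
    by_cases hp : p a = true
    · rw [List.dropWhile_cons_of_pos hp] at h; exact ih x xs h
    · rw [List.dropWhile_cons_of_neg hp] at h
      cases h
      simpa using hp

theorem intercalate_cons_ne (sep x : List Char) (L : List (List Char)) (h : L ≠ []) :
    List.intercalate sep (x :: L) = x ++ sep ++ List.intercalate sep L := by
  cases L with
  | nil => exact absurd rfl h
  | cons y ys => exact intercalate_cons_cons sep x y ys

theorem alt_char : ∀ (k : Nat) (c : Char) (rest : List Char), rest.length ≤ k →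
    List.intercalate [',', ' '] (collectRuns (c :: rest)) = c :: tailA c rest := by
  intro k
  induction k with
  | zero =>
    intro c rest h
    have : rest = [] := List.eq_nil_of_length_eq_zero (Nat.le_zero.mp h)
    subst this
    rw [collectRuns_cons]
    simp [collectRuns, tailA, List.intercalate]
  | succ k ih =>
    intro c rest h
    rw [collectRuns_cons]
    have hsame : ∀ d ∈ rest.takeWhile (fun d => charType d == charType c),
        charType d = charType c := by
      intro d hd
      have := List.mem_takeWhile_imp hd
      simpa using this
    have hsplit : rest.takeWhile (fun d => charType d == charType c) ++
        rest.dropWhile (fun d => charType d == charType c) = rest :=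
      List.takeWhile_append_dropWhile
    cases hdw : rest.dropWhile (fun d => charType d == charType c) with
    | nil =>
      have hrest : rest.takeWhile (fun d => charType d == charType c) = rest := by
        rw [hdw] at hsplit; simpa using hsplit
      have hsame' : ∀ d ∈ rest, charType d = charType c :=
        fun d hd => hsame d (by rw [hrest]; exact hd)
      have htl : tailA c rest = rest := by
        have := tailA_append_same rest c [] hsame'
        simpa [tailA] using this
      rw [hrest, collectRuns_nil]
      simp [List.intercalate, htl]
    | cons c' t =>
      rw [intercalate_cons_ne _ _ _ (by rw [collectRuns_cons]; exact List.cons_ne_nil _ _)]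
      have hlen : t.length ≤ k := by
        have hle := List.length_dropWhile_le (p := fun d => charType d == charType c) (l := rest)
        rw [hdw] at hle
        simp at hle
        omega
      rw [ih c' t hlen]
      have hne' : charType c' ≠ charType c := by
        have := dropWhile_head_false (fun d => charType d == charType c) rest c' t hdw
        simpa using this
      conv_rhs => rw [← hsplit]
      rw [List.cons_append]
      rw [tailA_append_same _ c _ hsame]
      rw [hdw]
      simp [tailA, hne']

-- A-side: the per-index piece appended at index idx, for the full list cs
def pieceA (cs : List Char) (idx : Int) : List Char :=
  if idx > 0 then
    if charType (PySem.List.pyGetD cs idx ' ') ≠ charType (PySem.List.pyGetD cs (idx - 1) ' ') then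
      [',', ' ', PySem.List.pyGetD cs idx ' ']
    else
      [PySem.List.pyGetD cs idx ' ']
  else
    [PySem.List.pyGetD cs idx ' ']

theorem a_flat (rest : List Char) : ∀ (pre : List Char) (p : Char),
    (PySem.List.pyRange ((pre.length : Int) + 1) ((pre.length : Int) + 1 + rest.length) 1).flatMap
      (pieceA (pre ++ p :: rest)) = tailA p rest := by
  induction rest with
  | nil =>
    intro pre p
    rw [PySem.List.pyRange_one_eq_nil (by simp)]
    rfl
  | cons c t ih =>
    intro pre p
    have hcons := PySem.List.pyRange_one_cons
      (a := (pre.length : Int) + 1) (b := (pre.length : Int) + 1 + (c :: t).length)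
      (by simp only [List.length_cons]; omega)
    rw [hcons, List.flatMap_cons]
    have hcur : PySem.List.pyGetD (pre ++ p :: c :: t) ((pre.length : Int) + 1) ' ' = c := by
      have h1 : ((pre.length : Int) + 1) = ((pre.length + 1 : Nat) : Int) := by push_cast; ring
      rw [h1, PySem.List.pyGetD_natCast]
      rw [List.getD_eq_getElem?_getD, List.getElem?_append_right (by simp)]
      simp
    have hprev : PySem.List.pyGetD (pre ++ p :: c :: t) ((pre.length : Int)) ' ' = p := by
      rw [(by ring : ((pre.length : Int)) = ((pre.length : Nat) : Int)), PySem.List.pyGetD_natCast]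
      rw [List.getD_eq_getElem?_getD, List.getElem?_append_right (by simp)]
      simp
    have hpiece : pieceA (pre ++ p :: c :: t) ((pre.length : Int) + 1)
        = (if charType c ≠ charType p then [',', ' ', c] else [c]) := by
      simp [pieceA, hcur, show (0:Int) < (pre.length:Int) + 1 from by omega,
        show (pre.length : Int) + 1 - 1 = (pre.length : Int) from by ring, hprev]
    have hrec := ih (pre ++ [p]) c
    have harith : ((pre ++ [p]).length : Int) + 1 = (pre.length : Int) + 1 + 1 := by
      simp
    have harith2 : ((pre ++ [p]).length : Int) + 1 + (t.length : Int)
        = (pre.length : Int) + 1 + ((c :: t).length : Int) := by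
      simp; ring
    rw [harith2, harith] at hrec
    have hlist : (pre ++ [p]) ++ c :: t = pre ++ p :: c :: t := by simp
    rw [hlist] at hrec
    rw [hrec, hpiece, tailA]

theorem a_char (c : Char) (rest : List Char) :
    text_transform (String.ofList (c :: rest)) = String.ofList (c :: tailA c rest) := by
  unfold text_transform
  simp only [String.toList_ofList]
  have hfun : (fun (letters : List Char) idx =>
      if idx > 0 then
        if charType (PySem.List.pyGetD (c :: rest) idx ' ')
            ≠ charType (PySem.List.pyGetD (c :: rest) (idx - 1) ' ') then
          letters ++ [',', ' ', PySem.List.pyGetD (c :: rest) idx ' ']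
        else
          letters ++ [PySem.List.pyGetD (c :: rest) idx ' ']
      else
        letters ++ [PySem.List.pyGetD (c :: rest) idx ' '])
      = (fun (letters : List Char) idx => letters ++ pieceA (c :: rest) idx) := by
    funext l i
    simp only [pieceA]
    split_ifs <;> rfl
  rw [hfun, PySem.List.foldl_append_eq_flatMap]
  have h0 : (0 : Int) < ((c :: rest).length : Int) := by exact_mod_cast Nat.succ_pos rest.length
  rw [PySem.List.pyRange_one_cons h0, List.flatMap_cons]
  have hp0 : pieceA (c :: rest) 0 = [c] := by
    simp [pieceA, PySem.List.pyGetD_zero]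
  have hmain := a_flat rest [] c
  simp only [List.length_nil, Nat.cast_zero, List.nil_append] at hmain
  have harith : (0 : Int) + 1 + (rest.length : Int) = ((c :: rest).length : Int) := by
    simp; ring
  rw [harith] at hmain
  rw [hmain, hp0]
  simp

-- ===== VERDICT (by name: the statement is the Claim_ definition above) =====
theorem text_transform_spec : Claim_equal_text_transform := by
  intro text _
  unfold Spec_text_transform text_transform_alt
  cases h : text.toList with
  | nil =>
    have htext : text = String.ofList [] := by rw [← h]; exact String.ofList_toList.symm
    rw [htext]
    unfold text_transform
    simp only [String.toList_ofList, List.length_nil, Nat.cast_zero]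
    rw [PySem.List.pyRange_one_eq_nil le_rfl, collectRuns_nil]
    simp [List.intercalate]
  | cons c rest =>
    have htext : text = String.ofList (c :: rest) := by
      rw [← h]; exact String.ofList_toList.symm
    rw [htext, a_char, alt_char rest.length c rest le_rfl]
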